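-- pv_equiv track=rewrite | github.com/dhruv01234/Test-case-generator | test_case_output.py | search
-- ===== SOURCE A (Python) =====
-- def search(n,li):
--     a = [0]*(n-1)
--     a[n-2] = li[n-1]
--     for i in range(n-3,-1,-1):
--         a[i] = a[i+1]|li[i+1]
--     b = [0]*(n-1)
--     for i in range(n-1):
--         b[i] = a[i]^li[i]
--     ans = b[0]
--     for i in range(1,n-1):
--         ans |= b[i]
--     return ans
-- ===== SOURCE B (Python) =====
-- def search(n, li):
--     # divide and conquer on li[:n-1]: go(xs, acc) returns
--     # (OR over x in xs of ((OR of elements right of x within xs, OR'ed with acc) ^ x), OR of xs)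
--     def go(xs, acc):
--         if len(xs) == 1:
--             return acc ^ xs[0], xs[0]
--         m = len(xs) // 2
--         ans_r, or_r = go(xs[m:], acc)
--         ans_l, or_l = go(xs[:m], acc | or_r)
--         return ans_l | ans_r, or_l | or_r
--     ans, _ = go(li[:n - 1], li[n - 1])
--     return ans
-- ===== Notes on version B (the rewrite author's own statement) =====
-- stated objective: alternative
-- what changed: Replaced the three sequential index loops (suffix-OR array, XOR array, final OR fold) by a recursive divide-and-conquer on the list: go(xs, acc) splits xs in half, solves the right half first, and passes its OR down as the accumulator to the left half, returning (answer, OR of xs) pairs.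
import Mathlib
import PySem

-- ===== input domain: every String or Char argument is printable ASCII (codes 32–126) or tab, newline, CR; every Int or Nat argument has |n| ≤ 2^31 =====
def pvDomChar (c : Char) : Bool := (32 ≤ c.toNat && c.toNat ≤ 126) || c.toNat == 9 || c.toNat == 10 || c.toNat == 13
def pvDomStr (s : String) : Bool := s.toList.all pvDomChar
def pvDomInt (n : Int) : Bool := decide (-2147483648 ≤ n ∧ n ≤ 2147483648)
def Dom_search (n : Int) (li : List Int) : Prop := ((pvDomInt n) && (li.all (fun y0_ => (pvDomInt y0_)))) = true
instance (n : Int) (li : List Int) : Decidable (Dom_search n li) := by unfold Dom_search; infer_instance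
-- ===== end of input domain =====

-- B replaces A's three sequential index loops by a divide-and-conquer recursion on the
-- list that threads the right half's OR into the left half; objective: alternative.

-- ===== PORT A =====
def search (n : Int) (li : List Int) : Int :=
  let a0 : List Int := List.replicate (n - 1).toNat 0
  let a1 := PySem.List.pySetD a0 (n - 2) (PySem.List.pyGetD li (n - 1) 0)
  let a2 := (PySem.List.pyRange (n - 3) (-1) (-1)).foldl
    (fun a i => PySem.List.pySetD a i
      (PySem.Int.bor (PySem.List.pyGetD a (i + 1) 0) (PySem.List.pyGetD li (i + 1) 0))) a1
  let b0 : List Int := List.replicate (n - 1).toNat 0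
  let b1 := (PySem.List.pyRange 0 (n - 1) 1).foldl
    (fun b i => PySem.List.pySetD b i
      (PySem.Int.bxor (PySem.List.pyGetD a2 i 0) (PySem.List.pyGetD li i 0))) b0
  let ans0 := PySem.List.pyGetD b1 0 0
  (PySem.List.pyRange 1 (n - 1) 1).foldl
    (fun ans i => PySem.Int.bor ans (PySem.List.pyGetD b1 i 0)) ans0

-- ===== PORT B =====
-- go(xs, acc): m = len(xs)//2 is a nonnegative in-range index, so the Python slices
-- xs[m:] / xs[:m] are exactly List.drop m / List.take m.
def pvGo (xs : List Int) (acc : Int) : Int × Int :=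
  if h1 : xs.length = 1 then
    (PySem.Int.bxor acc (PySem.List.pyGetD xs 0 0), PySem.List.pyGetD xs 0 0)
  else if h2 : xs.length ≤ 1 then
    (0, 0)  -- xs = []: the Python recurses forever here; unreachable under Pre_search
  else
    let m := xs.length / 2
    let r := pvGo (xs.drop m) acc
    let l := pvGo (xs.take m) (PySem.Int.bor acc r.2)
    (PySem.Int.bor l.1 r.1, PySem.Int.bor l.2 r.2)
termination_by xs.length
decreasing_by
  · simp only [List.length_drop]; omega
  · simp only [List.length_take]; omega

def search_alt (n : Int) (li : List Int) : Int :=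
  (pvGo (PySem.List.slice li none (some (n - 1))) (PySem.List.pyGetD li (n - 1) 0)).1

-- ===== PRECONDITION & SPEC =====
-- A raises IndexError exactly when n ≤ 1 (it indexes the empty array a) or when li has
-- fewer than n elements (it reads li[n-1]); Pre_ excludes exactly those inputs.
def Pre_search (n : Int) (li : List Int) : Prop := 2 ≤ n ∧ n ≤ (li.length : Int)
instance (n : Int) (li : List Int) : Decidable (Pre_search n li) := by unfold Pre_search; infer_instance
def pvWitness_search : Int × List Int := (3, [5, -2, 9])

def Spec_search (n : Int) (li : List Int) (out : Int) : Prop := out = search_alt n li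
instance (n : Int) (li : List Int) (out : Int) : Decidable (Spec_search n li out) := by unfold Spec_search; infer_instance

-- ===== CLAIM (what is proved, stated in full; the proofs are below) =====
def Claim_equal_search : Prop := ∀ (n : Int) (li : List Int), Dom_search n li → Pre_search n li → Spec_search n li (search n li)

-- ===== LEMMAS AND PROOFS =====

-- bitwise-OR on Int: PySem's bor agrees with core's Int.lor, hence is associative
theorem pv_land_add_ldiff : ∀ n m : Nat, (n &&& m) + Nat.ldiff n m = n := by
  intro n
  induction n using Nat.strong_induction_on with
  | _ n ih =>
    intro m
    rcases Nat.eq_zero_or_pos n with h0 | h0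
    · subst h0
      simp [HAnd.hAnd, AndOp.and, Nat.land, Nat.ldiff, Nat.bitwise_zero_left]
    · have hd : n / 2 < n := Nat.div_lt_self h0 (by norm_num)
      have h1 : (n &&& m) / 2 ^ 1 = (n / 2 ^ 1) &&& (m / 2 ^ 1) := Nat.bitwise_div_two_pow
      have h2 : (n &&& m) % 2 ^ 1 = (n % 2 ^ 1) &&& (m % 2 ^ 1) := Nat.bitwise_mod_two_pow
      have h3 : (Nat.ldiff n m) / 2 ^ 1 = Nat.ldiff (n / 2 ^ 1) (m / 2 ^ 1) := Nat.bitwise_div_two_pow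
      have h4 : (Nat.ldiff n m) % 2 ^ 1 = Nat.ldiff (n % 2 ^ 1) (m % 2 ^ 1) := Nat.bitwise_mod_two_pow
      have ihm := ih (n / 2) hd (m / 2)
      have hbit : ((n % 2) &&& (m % 2)) + Nat.ldiff (n % 2) (m % 2) = n % 2 := by
        have hn := Nat.mod_two_eq_zero_or_one n
        have hm := Nat.mod_two_eq_zero_or_one m
        rcases hn with h | h <;> rcases hm with h' | h' <;> rw [h, h'] <;>
          norm_num [Nat.ldiff, Nat.bitwise, HAnd.hAnd, AndOp.and, Nat.land]
      have e1 : 2 * ((n &&& m) / 2) + (n &&& m) % 2 = n &&& m := Nat.div_add_mod _ 2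
      have e2 : 2 * ((Nat.ldiff n m) / 2) + (Nat.ldiff n m) % 2 = Nat.ldiff n m := Nat.div_add_mod _ 2
      have e3 : 2 * (n / 2) + n % 2 = n := Nat.div_add_mod n 2
      simp only [pow_one] at h1 h2 h3 h4
      rw [h1, h2] at e1
      rw [h3, h4] at e2
      simp only [HAnd.hAnd, AndOp.and] at *
      omega

theorem pv_bor_eq_lor (a b : Int) : PySem.Int.bor a b = Int.lor a b := by
  rcases a with m | m <;> rcases b with n | n <;>
    simp [PySem.Int.bor, Int.lor, Int.negSucc_eq] <;>
    · have h1 := pv_land_add_ldiff n m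
      have h2 := pv_land_add_ldiff m n
      have h3 : Nat.ldiff n m ≤ n := by omega
      have h4 : Nat.ldiff m n ≤ m := by omega
      first
        | (rw [Nat.land_comm]; omega)
        | omega

theorem pv_bor_assoc (a b c : Int) :
    PySem.Int.bor (PySem.Int.bor a b) c = PySem.Int.bor a (PySem.Int.bor b c) := by
  simp only [pv_bor_eq_lor]
  rcases a with x | x <;> rcases b with y | y <;> rcases c with z | z <;>
    simp only [Int.lor] <;> congr 1 <;>
      apply Nat.eq_of_testBit_eq <;> intro i <;>
      simp only [Nat.testBit_lor, Nat.testBit_ldiff, Nat.testBit_land] <;>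
      cases x.testBit i <;> cases y.testBit i <;> cases z.testBit i <;> rfl

theorem pv_zero_bor (a : Int) : PySem.Int.bor 0 a = a := by
  rw [PySem.Int.bor_comm]; exact PySem.Int.bor_zero a

-- fold-of-bor facts
theorem pv_foldl_bor (l : List Int) : ∀ x y : Int,
    l.foldl PySem.Int.bor (PySem.Int.bor x y) = PySem.Int.bor x (l.foldl PySem.Int.bor y) := by
  induction l with
  | nil => intro x y; rfl
  | cons z l ih =>
      intro x y
      show l.foldl _ (PySem.Int.bor (PySem.Int.bor x y) z) = _
      rw [pv_bor_assoc, ih]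
      rfl

theorem pv_foldl_bor_zero (l : List Int) (x : Int) :
    l.foldl PySem.Int.bor x = PySem.Int.bor x (l.foldl PySem.Int.bor 0) := by
  have := pv_foldl_bor l x 0
  rwa [PySem.Int.bor_zero] at this

-- OR of a list, and foldl agrees with it
def pvOrA (xs : List Int) : Int := xs.foldr PySem.Int.bor 0

theorem pv_foldl_eq_orA (l : List Int) : l.foldl PySem.Int.bor 0 = pvOrA l := by
  induction l with
  | nil => rfl
  | cons x l ih =>
      show List.foldl _ (PySem.Int.bor 0 x) l = _
      rw [pv_zero_bor, pv_foldl_bor_zero, ih]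
      rfl

theorem pv_orA_append (l r : List Int) :
    pvOrA (l ++ r) = PySem.Int.bor (pvOrA l) (pvOrA r) := by
  induction l with
  | nil => simp [pvOrA, pv_zero_bor]
  | cons x l ih =>
      show PySem.Int.bor x (pvOrA (l ++ r)) = PySem.Int.bor (PySem.Int.bor x (pvOrA l)) (pvOrA r)
      rw [ih, pv_bor_assoc]

-- the value pvGo computes, specified structurally
def pvAns : List Int → Int → Int
  | [], _ => 0
  | x :: xs, acc =>
      PySem.Int.bor (PySem.Int.bxor (PySem.Int.bor acc (pvOrA xs)) x) (pvAns xs acc)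

theorem pv_pvAns_append (l r : List Int) (acc : Int) :
    pvAns (l ++ r) acc
      = PySem.Int.bor (pvAns l (PySem.Int.bor acc (pvOrA r))) (pvAns r acc) := by
  induction l with
  | nil => simp [pvAns, pv_zero_bor]
  | cons x l ih =>
      show PySem.Int.bor (PySem.Int.bxor (PySem.Int.bor acc (pvOrA (l ++ r))) x) (pvAns (l ++ r) acc) = _
      rw [ih, pv_orA_append]
      show _ = PySem.Int.bor
        (PySem.Int.bor (PySem.Int.bxor (PySem.Int.bor (PySem.Int.bor acc (pvOrA r)) (pvOrA l)) x)
          (pvAns l (PySem.Int.bor acc (pvOrA r)))) (pvAns r acc)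
      have hacc : PySem.Int.bor acc (PySem.Int.bor (pvOrA l) (pvOrA r))
          = PySem.Int.bor (PySem.Int.bor acc (pvOrA r)) (pvOrA l) := by
        rw [pv_bor_assoc, PySem.Int.bor_comm (pvOrA r) (pvOrA l), ← pv_bor_assoc,
          PySem.Int.bor_comm acc (pvOrA l), pv_bor_assoc, ← pv_bor_assoc,
          PySem.Int.bor_comm (pvOrA l) acc]
      rw [hacc, ← pv_bor_assoc]

theorem pvGo_spec_aux : ∀ (N : Nat) (xs : List Int), xs.length ≤ N → xs ≠ [] → ∀ acc : Int,
    pvGo xs acc = (pvAns xs acc, pvOrA xs) := by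
  intro N
  induction N with
  | zero =>
      intro xs h hne
      cases xs with
      | nil => exact absurd rfl hne
      | cons x t => simp at h
  | succ N ih =>
    intro xs hN hne acc
    match xs, hne with
    | [x], _ =>
      rw [pvGo]
      simp [pvAns, pvOrA, PySem.List.pyGetD, PySem.List.pyGet?, PySem.List.pyIdx?,
        PySem.Int.bor_zero]
    | x :: y :: xs'', _ =>
      set xs : List Int := x :: y :: xs'' with hxs
      have hlen : 2 ≤ xs.length := by rw [hxs]; simp
      rw [pvGo]
      have h1 : ¬ xs.length = 1 := by omega
      have h2 : ¬ xs.length ≤ 1 := by omega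
      rw [dif_neg h1, dif_neg h2]
      show (PySem.Int.bor
              (pvGo (xs.take (xs.length / 2))
                (PySem.Int.bor acc (pvGo (xs.drop (xs.length / 2)) acc).2)).1
              (pvGo (xs.drop (xs.length / 2)) acc).1,
            PySem.Int.bor
              (pvGo (xs.take (xs.length / 2))
                (PySem.Int.bor acc (pvGo (xs.drop (xs.length / 2)) acc).2)).2
              (pvGo (xs.drop (xs.length / 2)) acc).2) = (pvAns xs acc, pvOrA xs)
      have hm1 : 1 ≤ xs.length / 2 := by omega
      have hm2 : xs.length / 2 < xs.length := by omega
      have hdne : xs.drop (xs.length / 2) ≠ [] := by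
        intro h
        have := congrArg List.length h
        simp at this
        omega
      have htne : xs.take (xs.length / 2) ≠ [] := by
        intro h
        have := congrArg List.length h
        simp at this
        omega
      have hdlt : (xs.drop (xs.length / 2)).length ≤ N := by simp at hN ⊢; omega
      have htlt : (xs.take (xs.length / 2)).length ≤ N := by simp at hN ⊢; omega
      rw [ih _ hdlt hdne, ih _ htlt htne]
      have hsplit : xs = xs.take (xs.length / 2) ++ xs.drop (xs.length / 2) :=
        (List.take_append_drop _ xs).symm
      rw [Prod.mk.injEq]
      constructor
      · conv_rhs => rw [hsplit]
        rw [pv_pvAns_append]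
      · conv_rhs => rw [hsplit]
        rw [pv_orA_append]

theorem pvGo_spec (xs : List Int) (hne : xs ≠ []) (acc : Int) :
    pvGo xs acc = (pvAns xs acc, pvOrA xs) :=
  pvGo_spec_aux xs.length xs le_rfl hne acc

-- pvF li k j = OR of li[j+1..k]; pvB li k j = A's b[j]
def pvF (li : List Int) (k j : Nat) : Int := ((li.take (k + 1)).drop (j + 1)).foldl PySem.Int.bor 0
def pvB (li : List Int) (k j : Nat) : Int := PySem.Int.bxor (pvF li k j) (li.getD j 0)
def pvTail (li : List Int) (k t : Nat) : List Int := (List.range (k - t)).map (fun d => pvF li k (t + d))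

theorem pvF_self (li : List Int) (k : Nat) : pvF li k k = 0 := by
  unfold pvF
  rw [List.drop_eq_nil_of_le (by simp)]
  rfl

theorem pvF_rec (li : List Int) (k j : Nat) (hj : j < k) (hk : k < li.length) :
    pvF li k j = PySem.Int.bor (pvF li k (j + 1)) (li.getD (j + 1) 0) := by
  unfold pvF
  have hlen : (li.take (k + 1)).length = k + 1 := by
    rw [List.length_take]; omega
  have hlt : j + 1 < (li.take (k + 1)).length := by omega
  rw [List.drop_eq_getElem_cons hlt]
  show List.foldl _ (PySem.Int.bor 0 _) _ = _
  rw [pv_zero_bor, pv_foldl_bor_zero, PySem.Int.bor_comm]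
  congr 1
  rw [List.getElem_take, List.getD_eq_getElem li 0 (by omega)]

theorem pvTail_cons (li : List Int) (k t : Nat) (ht : t < k) :
    pvTail li k t = pvF li k t :: pvTail li k (t + 1) := by
  unfold pvTail
  have h : k - t = (k - (t + 1)) + 1 := by omega
  rw [h, List.range_succ_eq_map, List.map_cons, List.map_map]
  simp only [Nat.add_zero]
  congr 1
  apply List.map_congr_left
  intro d _
  show pvF li k (t + (d + 1)) = pvF li k (t + 1 + d)
  congr 1
  omega

theorem pv_set_replicate_last (t : Nat) (v : Int) :
    (List.replicate (t + 1) (0 : Int)).set t v = List.replicate t 0 ++ [v] := by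
  rw [List.replicate_succ', List.set_append]
  simp

theorem pv_set_replicate (k : Nat) (hk : 1 ≤ k) (v : Int) :
    (List.replicate k (0 : Int)).set (k - 1) v = List.replicate (k - 1) 0 ++ [v] := by
  obtain ⟨m, rfl⟩ : ∃ m, k = m + 1 := ⟨k - 1, by omega⟩
  simpa using pv_set_replicate_last m v

theorem pv_getD_append_replicate (t : Nat) (L : List Int) :
    (List.replicate (t + 1) (0 : Int) ++ L).getD (t + 1) 0 = L.getD 0 0 := by
  simp [List.getD, List.getElem?_append_right]

-- the first loop of A fills a with the suffix ORs
theorem pv_loopA (li : List Int) (k : Nat) (hk : k < li.length) :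
    ∀ t : Nat, t ≤ k - 1 →
    (PySem.List.pyRange ((t : Int) - 1) (-1) (-1)).foldl
      (fun a i => PySem.List.pySetD a i
        (PySem.Int.bor (PySem.List.pyGetD a (i + 1) 0) (PySem.List.pyGetD li (i + 1) 0)))
      (List.replicate t 0 ++ pvTail li k t)
    = pvTail li k 0 := by
  intro t
  induction t with
  | zero =>
      intro _
      rw [PySem.List.pyRange_neg_one_eq_nil (by norm_num)]
      rfl
  | succ t ih =>
      intro ht
      have hcast : ((t + 1 : Nat) : Int) - 1 = (t : Int) := by push_cast; ring
      rw [hcast, PySem.List.pyRange_neg_one_cons (by omega)]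
      rw [List.foldl_cons]
      have hstep :
          (PySem.List.pySetD (List.replicate (t + 1) 0 ++ pvTail li k (t + 1)) (t : Int)
            (PySem.Int.bor
              (PySem.List.pyGetD (List.replicate (t + 1) 0 ++ pvTail li k (t + 1)) ((t : Int) + 1) 0)
              (PySem.List.pyGetD li ((t : Int) + 1) 0)))
          = List.replicate t 0 ++ pvTail li k t := by
        have hc1 : (t : Int) + 1 = ((t + 1 : Nat) : Int) := by push_cast; ring
        rw [hc1, PySem.List.pyGetD_natCast, PySem.List.pyGetD_natCast, PySem.List.pySetD_natCast]
        rw [pv_getD_append_replicate, pvTail_cons li k (t + 1) (by omega)]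
        have hval : PySem.Int.bor ((pvF li k (t + 1) :: pvTail li k (t + 1 + 1)).getD 0 0)
            (li.getD (t + 1) 0) = pvF li k t := by
          rw [pvF_rec li k t (by omega) hk]
          rfl
        rw [hval, ← pvTail_cons li k (t + 1) (by omega)]
        rw [List.set_append]
        simp only [List.length_replicate, Nat.lt_succ_self, if_pos]
        rw [pv_set_replicate_last, List.append_assoc, List.singleton_append,
          ← pvTail_cons li k t (by omega)]
      rw [hstep]
      exact ih (by omega)

-- the second loop of A computes b = [pvB 0, …, pvB (k-1)]
theorem pv_loopB (li : List Int) (k : Nat) (a2 : List Int)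
    (ha : a2 = (List.range k).map (pvF li k)) :
    ∀ t : Nat, t ≤ k →
    (PySem.List.pyRange 0 (t : Int) 1).foldl
      (fun b i => PySem.List.pySetD b i
        (PySem.Int.bxor (PySem.List.pyGetD a2 i 0) (PySem.List.pyGetD li i 0)))
      (List.replicate k 0)
    = (List.range t).map (pvB li k) ++ List.replicate (k - t) 0 := by
  intro t
  induction t with
  | zero =>
      intro _
      rw [PySem.List.pyRange_one_eq_nil (by norm_num)]
      rfl
  | succ t ih =>
      intro ht
      have hc1 : ((t + 1 : Nat) : Int) = (t : Int) + 1 := by push_cast; ring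
      rw [hc1, PySem.List.pyRange_one_succ_right (by omega), List.foldl_append, ih (by omega)]
      rw [List.foldl_cons, List.foldl_nil]
      rw [PySem.List.pyGetD_natCast, PySem.List.pyGetD_natCast, PySem.List.pySetD_natCast]
      rw [ha, PySem.List.getD_map_range _ _ _ _ (by omega)]
      rw [List.set_append]
      simp only [List.length_map, List.length_range, Nat.sub_self,
        Nat.not_lt_of_le (Nat.le_refl t)]
      have hrep : (List.replicate (k - t) (0 : Int)).set 0
          (PySem.Int.bxor (pvF li k t) (li.getD t 0))
          = pvB li k t :: List.replicate (k - (t + 1)) 0 := by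
        have h : k - t = (k - (t + 1)) + 1 := by omega
        rw [h, List.replicate_succ, List.set_cons_zero]
        rfl
      rw [hrep, List.range_succ, List.map_append]
      simp

theorem pvF_last (li : List Int) (k : Nat) (hk1 : 1 ≤ k) (hk : k < li.length) :
    pvF li k (k - 1) = li.getD k 0 := by
  have h : k - 1 < k := by omega
  rw [pvF_rec li k (k - 1) h hk]
  have h2 : k - 1 + 1 = k := by omega
  rw [h2, pvF_self, pv_zero_bor]

theorem pvTail_last (li : List Int) (k : Nat) (hk1 : 1 ≤ k) (hk : k < li.length) :
    pvTail li k (k - 1) = [li.getD k 0] := by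
  rw [pvTail_cons li k (k - 1) (by omega), pvF_last li k hk1 hk]
  have h : k - 1 + 1 = k := by omega
  rw [h]
  unfold pvTail
  simp

-- pvF written as acc-OR of the residual tail inside li.take k
theorem pvF_eq_orA (li : List Int) (k : Nat) (hk : k < li.length) :
    ∀ m t : Nat, k - t = m + 1 → t < k →
    pvF li k t = PySem.Int.bor (li.getD k 0) (pvOrA ((li.take k).drop (t + 1))) := by
  intro m
  induction m with
  | zero =>
      intro t hm ht
      have htk : t = k - 1 := by omega
      subst htk
      have h : k - 1 + 1 = k := by omega
      rw [pvF_last li k (by omega) hk, h, List.drop_eq_nil_of_le (by simp)]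
      show _ = PySem.Int.bor (li.getD k 0) 0
      rw [PySem.Int.bor_zero]
  | succ m ih =>
      intro t hm ht
      have ht1 : t + 1 < k := by omega
      rw [pvF_rec li k t ht hk, ih (t + 1) (by omega) ht1]
      have hlt : t + 1 < (li.take k).length := by simp; omega
      rw [List.drop_eq_getElem_cons hlt]
      show _ = PySem.Int.bor (li.getD k 0)
        (PySem.Int.bor ((li.take k)[t + 1]) (pvOrA ((li.take k).drop (t + 1 + 1))))
      rw [List.getElem_take]
      rw [show li.getD (t + 1) 0 = li[t + 1]'(by omega) from
        List.getD_eq_getElem li 0 (by omega)]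
      rw [pv_bor_assoc, PySem.Int.bor_comm (pvOrA _) (li[t + 1])]

-- pvAns on a suffix of li.take k is the OR of the pvB values there
theorem pv_bridge (li : List Int) (k : Nat) (hk : k < li.length) :
    ∀ m t : Nat, t + m = k →
    pvAns ((li.take k).drop t) (li.getD k 0)
      = ((List.range' t m).map (pvB li k)).foldr PySem.Int.bor 0 := by
  intro m
  induction m with
  | zero =>
      intro t ht
      have : t = k := by omega
      subst this
      rw [List.drop_eq_nil_of_le (by simp)]
      rfl
  | succ m ih =>
      intro t ht
      have htk : t < k := by omega
      have hlt : t < (li.take k).length := by simp; omega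
      rw [List.drop_eq_getElem_cons hlt]
      show PySem.Int.bor
        (PySem.Int.bxor (PySem.Int.bor (li.getD k 0) (pvOrA ((li.take k).drop (t + 1)))) ((li.take k)[t]))
        (pvAns ((li.take k).drop (t + 1)) (li.getD k 0)) = _
      rw [← pvF_eq_orA li k hk m t (by omega) htk, List.getElem_take,
        ih (t + 1) (by omega)]
      rw [List.range'_succ, List.map_cons, List.foldr_cons]
      congr 1
      show PySem.Int.bxor (pvF li k t) (li[t]) = pvB li k t
      rw [pvB, List.getD_eq_getElem li 0 (by omega)]

-- ===== VERDICT (by name: the statement is the Claim_ definition above) =====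
theorem search_spec : Claim_equal_search := by
  unfold Claim_equal_search
  intro n li _ hpre
  obtain ⟨h2, hlen⟩ := hpre
  unfold Spec_search
  set k := (n - 1).toNat with hkdef
  have hk : (k : Int) = n - 1 := Int.toNat_of_nonneg (by omega)
  have hk1 : 1 ≤ k := by omega
  have hklen : k < li.length := by omega
  have hc1 : n - 1 = (k : Int) := by omega
  have hc2 : n - 2 = ((k - 1 : Nat) : Int) := by omega
  have hc3 : n - 3 = ((k - 1 : Nat) : Int) - 1 := by omega
  -- ===== A side =====
  have ha1 : PySem.List.pySetD (List.replicate k (0 : Int)) (n - 2) (PySem.List.pyGetD li (n - 1) 0)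
      = List.replicate (k - 1) 0 ++ pvTail li k (k - 1) := by
    rw [hc1, hc2, PySem.List.pySetD_natCast, PySem.List.pyGetD_natCast]
    rw [pvTail_last li k hk1 hklen]
    exact pv_set_replicate k hk1 _
  have hA : search n li = ((List.range k).map (pvB li k)).foldl PySem.Int.bor 0 := by
    show (let a0 : List Int := List.replicate (n - 1).toNat 0
          let a1 := PySem.List.pySetD a0 (n - 2) (PySem.List.pyGetD li (n - 1) 0)
          let a2 := (PySem.List.pyRange (n - 3) (-1) (-1)).foldl
            (fun a i => PySem.List.pySetD a i
              (PySem.Int.bor (PySem.List.pyGetD a (i + 1) 0) (PySem.List.pyGetD li (i + 1) 0))) a1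
          let b0 : List Int := List.replicate (n - 1).toNat 0
          let b1 := (PySem.List.pyRange 0 (n - 1) 1).foldl
            (fun b i => PySem.List.pySetD b i
              (PySem.Int.bxor (PySem.List.pyGetD a2 i 0) (PySem.List.pyGetD li i 0))) b0
          let ans0 := PySem.List.pyGetD b1 0 0
          (PySem.List.pyRange 1 (n - 1) 1).foldl
            (fun ans i => PySem.Int.bor ans (PySem.List.pyGetD b1 i 0)) ans0) = _
    simp only [← hkdef]
    rw [ha1, hc3, pv_loopA li k hklen (k - 1) (by omega)]
    have htail0 : pvTail li k 0 = (List.range k).map (pvF li k) := by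
      unfold pvTail
      simp
    rw [htail0, hc1, pv_loopB li k _ rfl k (le_refl k)]
    simp only [Nat.sub_self, List.replicate_zero, List.append_nil]
    rw [PySem.List.pyGetD_zero, PySem.List.getD_map_range _ _ _ _ (by omega)]
    have hlb : (k : Int) = ((((List.range k).map (pvB li k)).length : Nat) : Int) := by
      simp
    rw [hlb, PySem.List.foldl_pyRange_pyGetD' _ _ _ _ (by norm_num)]
    show (((List.range k).map (pvB li k)).drop 1).foldl _ (pvB li k 0) = _
    have hsplit : (List.range k).map (pvB li k)
        = pvB li k 0 :: (((List.range k).map (pvB li k)).drop 1) := by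
      have h : k = (k - 1) + 1 := by omega
      rw [h, List.range_succ_eq_map]
      simp
    conv_rhs => rw [hsplit]
    rw [List.foldl_cons, pv_zero_bor]
  -- ===== B side =====
  have hB : search_alt n li = ((List.range k).map (pvB li k)).foldl PySem.Int.bor 0 := by
    show (pvGo (PySem.List.slice li none (some (n - 1))) (PySem.List.pyGetD li (n - 1) 0)).1 = _
    rw [hc1, PySem.List.pyGetD_natCast, PySem.List.slice_to_natCast]
    have htne : li.take k ≠ [] := by
      intro h
      have hlt : (li.take k).length = 0 := by rw [h]; rfl
      rw [List.length_take] at hlt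
      omega
    rw [pvGo_spec (li.take k) htne (li.getD k 0)]
    show pvAns (li.take k) (li.getD k 0) = _
    have h0 : li.take k = (li.take k).drop 0 := rfl
    rw [h0, pv_bridge li k hklen k 0 (by omega)]
    rw [← List.range_eq_range', pv_foldl_eq_orA]
    rfl
  rw [hA, hB]
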